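-- pv_equiv track=rewrite | github.com/Huch0/algorithm_community | 36week/PCCP_1st_Q1~Q3.py | solution1
-- ===== SOURCE A (Python) =====
-- from collections import deque
--
-- def solution1(input_string):
--     answer = ''
--
--     stack = deque()
--     stack.append(input_string[0])
--
--     for i in input_string[1:]:
--         if i != stack[-1]:
--             if i in stack and i not in answer:
--                 answer += i
--             stack.append(i)
--     if answer == "":
--         return "N"
--     else:
--         return "".join(sorted(answer))
-- ===== SOURCE B (Python) =====
-- def solution1(input_string):
--     # collapse consecutive runs into the run-start characters
--     runs = []
--     for c in input_string:
--         if not runs or runs[-1] != c: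
--             runs.append(c)
--     # sort the run starters: repeated characters become adjacent,
--     # then one adjacent-pair scan collects them (already in sorted order)
--     runs.sort()
--     answer = []
--     for prev, cur in zip(runs, runs[1:]):
--         if prev == cur and (not answer or answer[-1] != cur):
--             answer.append(cur)
--     return ''.join(answer) if answer else 'N'
-- ===== Notes on version B (the rewrite author's own statement) =====
-- stated objective: alternative
-- what changed: B collapses the string into its run-start list, SORTS that list, and collects the answer by a single adjacent-equal-pair scan over the sorted list (the answer comes out already sorted and deduplicated), replacing A's inline membership tests of each char against the growing stack and answer followed by a final sort.
import Mathlib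
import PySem

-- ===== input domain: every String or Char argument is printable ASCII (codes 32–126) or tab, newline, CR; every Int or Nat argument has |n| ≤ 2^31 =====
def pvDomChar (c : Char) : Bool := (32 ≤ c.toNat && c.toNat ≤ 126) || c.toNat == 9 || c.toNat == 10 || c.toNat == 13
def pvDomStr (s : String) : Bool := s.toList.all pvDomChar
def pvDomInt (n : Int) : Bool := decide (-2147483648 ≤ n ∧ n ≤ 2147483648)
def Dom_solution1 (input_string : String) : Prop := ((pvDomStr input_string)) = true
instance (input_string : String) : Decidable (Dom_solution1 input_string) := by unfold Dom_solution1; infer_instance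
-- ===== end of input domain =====

-- B sorts the run-start list and collects adjacent equal pairs in one scan, replacing A's
-- inline membership tests against the stack and answer (objective: alternative, same cost).

-- ===== PORT A =====
-- A's loop body on the (answer, stack) pair. stack[-1] is ported by hand as List.getLast?
-- (none = deque IndexError); the none branch is unreachable because the stack starts
-- nonempty and only grows, so this is exact.
def pvStepA (st : List Char × List Char) (i : Char) : List Char × List Char :=
  match st.2.getLast? with
  | none => st
  | some top =>
    if i ≠ top then
      (if i ∈ st.2 ∧ i ∉ st.1 then st.1 ++ [i] else st.1, st.2 ++ [i])
    else st

-- input_string[0] on "" raises IndexError: the [] branch is excluded by Pre_solution1.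
def solution1 (input_string : String) : String :=
  match input_string.toList with
  | [] => ""
  | c0 :: rest =>
    let st := rest.foldl pvStepA ([], [c0])
    if st.1 = [] then "N"
    else String.ofList (PySem.List.sorted st.1 (fun x => x) false)

-- ===== PORT B =====
-- Source B's run-collapsing loop body: runs[-1] is List.getLast? (the emptiness test first,
-- exactly as in 'not runs or runs[-1] != c').
def pvStepB (rs : List Char) (c : Char) : List Char :=
  match rs.getLast? with
  | none => rs ++ [c]
  | some t => if t ≠ c then rs ++ [c] else rs

-- Source B's adjacent-pair scan body: 'not answer or answer[-1] != cur' is the same getLast? test.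
def pvStepC (ans : List Char) (p : Char × Char) : List Char :=
  if p.1 = p.2 ∧ (ans = [] ∨ ans.getLast? ≠ some p.2) then ans ++ [p.2] else ans

-- runs.sort() is PySem.List.sorted with the identity key; zip(runs, runs[1:]) is
-- List.zip sruns (sruns.drop 1); ''.join of single characters is String.ofList (exact).
def solution1_alt (input_string : String) : String :=
  let runs := input_string.toList.foldl pvStepB []
  let sruns := PySem.List.sorted runs (fun x => x) false
  let answer := (sruns.zip (sruns.drop 1)).foldl pvStepC []
  if answer ≠ [] then String.ofList answer else "N"

-- ===== PRECONDITION & SPEC =====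
-- Pre_ excludes only the empty string, on which A raises IndexError at input_string[0].
def Pre_solution1 (input_string : String) : Prop := input_string ≠ ""
instance (input_string : String) : Decidable (Pre_solution1 input_string) := by
  unfold Pre_solution1; infer_instance
def pvWitness_solution1 : String := "aabaa"

def Spec_solution1 (input_string : String) (out : String) : Prop := out = solution1_alt input_string
instance (input_string : String) (out : String) : Decidable (Spec_solution1 input_string out) := by
  unfold Spec_solution1; infer_instance

-- ===== CLAIM (what is proved, stated in full; the proofs are below) =====
def Claim_equal_solution1 : Prop := ∀ (input_string : String), Dom_solution1 input_string → Pre_solution1 input_string → Spec_solution1 input_string (solution1 input_string)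

-- ===== LEMMAS AND PROOFS =====

-- Invariant for A's loop: the stack is nonempty and the answer holds exactly the
-- characters with at least two runs on the stack, without duplicates.
def pvInv (ans stack : List Char) : Prop :=
  stack ≠ [] ∧ ans.Nodup ∧ (∀ c, c ∈ ans ↔ 2 ≤ stack.count c)

lemma pvCount_concat (stack : List Char) (i c : Char) :
    (stack ++ [i]).count c = stack.count c + (if c = i then 1 else 0) := by
  by_cases hc : c = i
  · subst hc; simp
  · simp [List.count_append, hc, Ne.symm hc]

lemma pvInv_step (ans stack : List Char) (i : Char) (h : pvInv ans stack) :
    pvInv (if i ∈ stack ∧ i ∉ ans then ans ++ [i] else ans) (stack ++ [i]) := by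
  obtain ⟨hne, hansnd, hans⟩ := h
  refine ⟨by simp, ?_, ?_⟩
  · split_ifs with hcase
    · exact List.Nodup.append hansnd (List.nodup_singleton i)
        (by intro a ha hb; rw [List.mem_singleton] at hb; subst hb; exact hcase.2 ha)
    · exact hansnd
  · intro c
    rw [pvCount_concat]
    by_cases hc : c = i
    · subst hc
      rw [if_pos rfl]
      by_cases hcase : c ∈ stack ∧ c ∉ ans
      · rw [if_pos hcase]
        have h1 : 1 ≤ stack.count c := List.count_pos_iff.mpr hcase.1
        simp only [List.mem_append, List.mem_singleton]
        exact ⟨fun _ => by omega, fun _ => by simp⟩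
      · rw [if_neg hcase]
        rcases Decidable.not_and_iff_not_or_not.mp hcase with hnst | hin
        · have h0 : stack.count c = 0 := List.count_eq_zero.mpr hnst
          exact ⟨fun hmem => absurd ((hans c).mp hmem) (by omega), fun hle => by omega⟩
        · have hmem : c ∈ ans := Decidable.not_not.mp hin
          have := (hans c).mp hmem
          exact ⟨fun _ => by omega, fun _ => hmem⟩
    · rw [if_neg hc]
      by_cases hcase : i ∈ stack ∧ i ∉ ans
      · rw [if_pos hcase]
        simp only [List.mem_append, List.mem_singleton]
        constructor
        · rintro (hmem | rfl)
          · have := (hans c).mp hmem; omega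
          · exact absurd rfl hc
        · intro hle; left; exact (hans c).mpr (by omega)
      · rw [if_neg hcase]
        rw [hans c]; omega

-- Over the whole loop: A's invariant is preserved and A's stack equals B's run list.
lemma pvInv_fold (l : List Char) :
    ∀ (ans stack : List Char), pvInv ans stack →
    pvInv (l.foldl pvStepA (ans, stack)).1 (l.foldl pvStepA (ans, stack)).2 ∧
    (l.foldl pvStepA (ans, stack)).2 = l.foldl pvStepB stack := by
  induction l with
  | nil => intro ans stack h; exact ⟨h, rfl⟩
  | cons i t ih =>
    intro ans stack h
    obtain ⟨top, hget⟩ := Option.isSome_iff_exists.mp (List.getLast?_isSome.mpr h.1)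
    simp only [List.foldl_cons]
    have hA : pvStepA (ans, stack) i =
        (if i ≠ top then
          (if i ∈ stack ∧ i ∉ ans then ans ++ [i] else ans, stack ++ [i])
        else (ans, stack)) := by
      simp [pvStepA, hget]
    have hB : pvStepB stack i = (if top ≠ i then stack ++ [i] else stack) := by
      simp [pvStepB, hget]
    by_cases hip : i = top
    · rw [hA, if_neg (fun hh => hh hip), hB, if_neg (fun hh => hh hip.symm)]
      exact ih ans stack h
    · rw [hA, if_pos hip, hB, if_pos (Ne.symm hip)]
      exact ih _ _ (pvInv_step ans stack i h)

-- The adjacent-pair scan on a sorted list: the result is strictly increasing and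
-- contains exactly the old answer plus the characters occurring at least twice.
lemma pvScan (s : List Char) :
    ∀ (ans : List Char), s.Pairwise (· ≤ ·) → ans.IsChain (· < ·) →
    (∀ x ∈ ans, ∀ y ∈ s, x ≤ y) →
    ((s.zip (s.drop 1)).foldl pvStepC ans).IsChain (· < ·) ∧
    (∀ c, c ∈ (s.zip (s.drop 1)).foldl pvStepC ans ↔ c ∈ ans ∨ 2 ≤ s.count c) := by
  induction s with
  | nil =>
    intro ans _ hch _
    exact ⟨hch, fun c => by simp⟩
  | cons a s' ih =>
    intro ans hpw hch hbd
    cases s' with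
    | nil =>
      refine ⟨by simpa using hch, fun c => ?_⟩
      have hcle : (([a] : List Char)).count c ≤ 1 := by
        have := List.count_le_length (l := [a]) (a := c)
        simpa using this
      have hz : (([a] : List Char).zip (List.drop 1 [a])).foldl pvStepC ans = ans := rfl
      rw [hz]
      constructor
      · exact fun h => Or.inl h
      · rintro (h | h)
        · exact h
        · exact absurd h (by omega)
    | cons b t =>
      have hzip : ((a :: b :: t).zip ((a :: b :: t).drop 1)) =
          (a, b) :: ((b :: t).zip ((b :: t).drop 1)) := by
        simp
      rw [hzip, List.foldl_cons]
      have hpw' : (b :: t).Pairwise (· ≤ ·) := hpw.of_cons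
      have hab : a ≤ b := (List.pairwise_cons.mp hpw).1 b (by simp)
      have hbt : ∀ y ∈ t, b ≤ y := fun y hy => (List.pairwise_cons.mp hpw').1 y hy
      have hbd' : ∀ x ∈ pvStepC ans (a, b), ∀ y ∈ b :: t, x ≤ y := by
        intro x hx y hy
        unfold pvStepC at hx
        split_ifs at hx with hcase
        · rcases List.mem_append.mp hx with hx | hx
          · exact hbd x hx y (by simp [hy])
          · rw [List.mem_singleton] at hx; subst hx
            rcases List.mem_cons.mp hy with rfl | hy
            · exact le_refl _
            · exact hbt y hy
        · exact hbd x hx y (by simp [hy])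
      have hch' : (pvStepC ans (a, b)).IsChain (· < ·) := by
        unfold pvStepC
        split_ifs with hcase
        · obtain ⟨hab2, hdd⟩ := hcase
          rw [List.isChain_append]
          refine ⟨hch, List.isChain_singleton b, ?_⟩
          intro x hx y hy
          simp only [List.head?_cons, Option.mem_def, Option.some.injEq] at hy
          subst hy
          have hxm : x ∈ ans := List.mem_of_mem_getLast? hx
          have hxle : x ≤ b := le_trans (hbd x hxm a (by simp)) (le_of_eq hab2)
          rcases hdd with hdd | hdd
          · subst hdd; simp at hx
          · exact lt_of_le_of_ne hxle (fun he => hdd (he ▸ hx))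
        · exact hch
      obtain ⟨hRch, hRmem⟩ := ih (pvStepC ans (a, b)) hpw' hch' hbd'
      refine ⟨hRch, fun c => ?_⟩
      rw [hRmem c]
      have hcnt : (a :: b :: t).count c = ((b :: t).count c) + (if c = a then 1 else 0) := by
        by_cases hc : c = a
        · subst hc; simp [List.count_cons]
        · simp [List.count_cons, hc, Ne.symm hc]
      by_cases hab2 : a = b
      · subst hab2
        by_cases hdd : ans = [] ∨ ans.getLast? ≠ some a
        · have hstep : pvStepC ans (a, a) = ans ++ [a] := by
            simp only [pvStepC]
            exact if_pos ⟨trivial, hdd⟩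
          rw [hstep]
          simp only [List.mem_append, List.mem_singleton]
          have hca : 1 ≤ (a :: t).count a := by simp
          constructor
          · rintro (⟨hm | rfl⟩ | h2)
            · exact Or.inl hm
            · right; rw [hcnt, if_pos rfl]; omega
            · right; rw [hcnt]; omega
          · rintro (hm | h2)
            · exact Or.inl (Or.inl hm)
            · by_cases hc : c = a
              · exact Or.inl (Or.inr hc)
              · right; rw [hcnt, if_neg hc] at h2; omega
        · have hstep : pvStepC ans (a, a) = ans := by
            simp only [pvStepC]
            exact if_neg (fun hcon => hdd hcon.2)
          rw [hstep]
          have hdd2 : ans.getLast? = some a := by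
            by_cases h1 : ans = []
            · exact absurd (Or.inl h1) hdd
            · by_cases h2 : ans.getLast? = some a
              · exact h2
              · exact absurd (Or.inr h2) hdd
          have hma : a ∈ ans := List.mem_of_mem_getLast? (by rw [hdd2]; rfl)
          constructor
          · rintro (hm | h2)
            · exact Or.inl hm
            · right; rw [hcnt]; omega
          · rintro (hm | h2)
            · exact Or.inl hm
            · by_cases hc : c = a
              · subst hc; exact Or.inl hma
              · right; rw [hcnt, if_neg hc] at h2; omega
      · have hstep : pvStepC ans (a, b) = ans := by
          simp [pvStepC, hab2]
        rw [hstep]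
        have hanbt : (b :: t).count a = 0 := by
          rw [List.count_eq_zero]
          intro hmem
          rcases List.mem_cons.mp hmem with rfl | hmem
          · exact hab2 rfl
          · exact hab2 (le_antisymm hab (hbt a hmem))
        constructor
        · rintro (hm | h2)
          · exact Or.inl hm
          · right; rw [hcnt]; omega
        · rintro (hm | h2)
          · exact Or.inl hm
          · by_cases hc : c = a
            · subst hc; rw [hcnt, if_pos rfl, hanbt] at h2; omega
            · right; rw [hcnt, if_neg hc] at h2; omega

-- ===== VERDICT (by name: the statements are the Claim_ definitions above) =====
theorem solution1_spec : Claim_equal_solution1 := by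
  unfold Claim_equal_solution1
  intro s _ hpre
  unfold Spec_solution1 solution1 solution1_alt
  cases hs : s.toList with
  | nil => exact absurd (String.toList_eq_nil_iff.mp hs) hpre
  | cons c0 rest =>
    simp only [List.foldl_cons]
    have hB0 : pvStepB [] c0 = [c0] := rfl
    rw [hB0]
    have hinv0 : pvInv [] [c0] := by
      refine ⟨by simp, List.nodup_nil, fun c => ⟨fun h => absurd h List.not_mem_nil, fun h => ?_⟩⟩
      have := List.count_le_length (l := [c0]) (a := c)
      simp at this
      omega
    obtain ⟨⟨hne, hnd, hmem⟩, hstack⟩ := pvInv_fold rest [] [c0] hinv0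
    set ansA := (rest.foldl pvStepA ([], [c0])).1 with hansA
    set runs := rest.foldl pvStepB [c0] with hruns
    set sruns := PySem.List.sorted runs (fun x => x) false with hsruns
    have hpw : sruns.Pairwise (· ≤ ·) := PySem.List.sorted_pairwise runs (fun x => x)
    have hperm : sruns.Perm runs := PySem.List.sorted_perm runs (fun x => x) false
    obtain ⟨hRch, hRmem⟩ := pvScan sruns [] hpw List.isChain_nil (by simp)
    set R := (sruns.zip (sruns.drop 1)).foldl pvStepC [] with hR
    have hRmem' : ∀ c, c ∈ R ↔ c ∈ ansA := by
      intro c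
      rw [hRmem c, hmem c, hstack]
      have : sruns.count c = runs.count c := hperm.count_eq c
      simp [this]
    have hRpw : R.Pairwise (· < ·) := List.isChain_iff_pairwise.mp hRch
    have hRnd : R.Nodup := hRpw.imp ne_of_lt
    have hpermRA : R.Perm ansA := (List.perm_ext_iff_of_nodup hRnd hnd).mpr hRmem'
    have hsorted : PySem.List.sorted ansA (fun x => x) false = R :=
      PySem.List.sorted_eq_of_perm_of_pairwise_lt _ _ _ hpermRA hRpw
    by_cases hnil : ansA = []
    · have hRnil : R = [] := List.Perm.eq_nil (hnil ▸ hpermRA)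
      rw [if_pos hnil, hRnil]
      simp
    · have hRne : R ≠ [] := by
        intro hcon
        exact hnil ((hcon ▸ hpermRA).symm.eq_nil)
      rw [if_neg hnil, if_pos hRne, hsorted]
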